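-- pv_equiv track=rewrite | github.com/storj-project/storj-agent | moltbook_heartbeat.py | _collapse_repeats
-- ===== SOURCE A (Python) =====
-- def _collapse_repeats(tok):
--     """Collapse runs of 3+ identical chars to 1, keep doubles (for words like 'three', 'speed')."""
--     new_tok = ""
--     i_ch = 0
--     while i_ch < len(tok):
--         ch = tok[i_ch]
--         run = 1
--         while i_ch + run < len(tok) and tok[i_ch + run] == ch:
--             run += 1
--         if run >= 3:
--             new_tok += ch
--         else:
--             new_tok += ch * run
--         i_ch += run
--     return new_tok
-- ===== SOURCE B (Python) =====
-- def _collapse_repeats(tok):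
--     """Collapse runs of 3+ identical chars to 1, keep doubles."""
--     runs = []
--     for ch in tok:
--         if runs and runs[-1][-1] == ch:
--             runs[-1] += ch
--         else:
--             runs.append(ch)
--     return "".join(r[:1] if len(r) >= 3 else r for r in runs)
-- ===== Notes on version B (the rewrite author's own statement) =====
-- stated objective: idiomatic
-- what changed: Replaces the index-jumping while loop with nested run-counting by a single char-wise pass that groups characters into a list of runs (hand-rolled groupby) followed by a map/join keeping each run or its first character.
import Mathlib
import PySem

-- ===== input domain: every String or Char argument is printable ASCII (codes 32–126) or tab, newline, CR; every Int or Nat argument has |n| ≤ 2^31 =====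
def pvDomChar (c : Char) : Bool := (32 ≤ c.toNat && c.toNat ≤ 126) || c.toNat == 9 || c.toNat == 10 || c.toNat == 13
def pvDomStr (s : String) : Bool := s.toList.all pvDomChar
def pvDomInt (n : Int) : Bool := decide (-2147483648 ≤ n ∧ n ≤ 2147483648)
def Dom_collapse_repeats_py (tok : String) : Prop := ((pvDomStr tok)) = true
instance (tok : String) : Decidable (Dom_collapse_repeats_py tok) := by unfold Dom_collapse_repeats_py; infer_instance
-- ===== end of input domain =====

-- B replaces A's index-jumping while loop (inner run-counting scan) by a single pass that
-- builds the list of runs, then maps each run to itself or its first char and joins (idiomatic).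

-- ===== PORT A =====
-- inner while loop: counts how many further chars equal ch
def pvRunLenA (ch : Char) : List Char → Nat
  | [] => 0
  | c :: l => if c == ch then pvRunLenA ch l + 1 else 0

-- outer while loop over i_ch, advancing by the run length
def pvALoop : List Char → List Char
  | [] => []
  | ch :: rest =>
    let run := pvRunLenA ch rest + 1
    (if 3 ≤ run then [ch] else List.replicate run ch) ++ pvALoop (rest.drop (run - 1))
termination_by l => l.length
decreasing_by simp [List.length_drop]

def collapse_repeats_py (tok : String) : String := String.ofList (pvALoop tok.toList)

-- ===== PORT B =====
-- one iteration of B's for-loop: extend the last run or start a new one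
def pvBStep (runs : List (List Char)) (ch : Char) : List (List Char) :=
  match runs.getLast? with
  | some r => if r.getLast?.any (· == ch) then runs.dropLast ++ [r ++ [ch]] else runs ++ [[ch]]
  | none => runs ++ [[ch]]

-- r[:1] if len(r) >= 3 else r
def pvBCollapse (r : List Char) : List Char := if 3 ≤ r.length then r.take 1 else r

def collapse_repeats_py_alt (tok : String) : String :=
  String.ofList (((tok.toList.foldl pvBStep []).map pvBCollapse).flatten)

-- ===== PRECONDITION & SPEC =====
def Spec_collapse_repeats_py (tok : String) (out : String) : Prop := out = collapse_repeats_py_alt tok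
instance (tok : String) (out : String) : Decidable (Spec_collapse_repeats_py tok out) := by unfold Spec_collapse_repeats_py; infer_instance

-- ===== CLAIM (what is proved, stated in full; the proofs are below) =====
def Claim_equal_collapse_repeats_py : Prop := ∀ (tok : String), Dom_collapse_repeats_py tok → Spec_collapse_repeats_py tok (collapse_repeats_py tok)

-- ===== LEMMAS AND PROOFS =====

-- unfolding equations for the two well-founded recursions
-- (stated here because simp/rfl cannot unfold wf definitions directly)
def pvRecRuns : List Char → List (List Char)
  | [] => []
  | c :: l => (c :: l.takeWhile (· == c)) :: pvRecRuns (l.dropWhile (· == c))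
termination_by l => l.length
decreasing_by simpa using Nat.lt_succ_of_le (List.length_dropWhile_le _ _)

theorem pvALoop_nil : pvALoop [] = [] := by rw [pvALoop.eq_def]

theorem pvALoop_cons (ch : Char) (rest : List Char) :
    pvALoop (ch :: rest) =
      (if 3 ≤ pvRunLenA ch rest + 1 then [ch] else List.replicate (pvRunLenA ch rest + 1) ch)
        ++ pvALoop (rest.drop (pvRunLenA ch rest + 1 - 1)) := by
  rw [pvALoop.eq_def]

theorem pvRecRuns_nil : pvRecRuns [] = [] := by rw [pvRecRuns.eq_def]

theorem pvRecRuns_cons (c : Char) (l : List Char) :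
    pvRecRuns (c :: l) = (c :: l.takeWhile (· == c)) :: pvRecRuns (l.dropWhile (· == c)) := by
  rw [pvRecRuns.eq_def]

theorem pvTakeWhile_rep (ch : Char) (l : List Char) :
    l.takeWhile (· == ch) = List.replicate (pvRunLenA ch l) ch := by
  induction l with
  | nil => rfl
  | cons c l ih =>
    by_cases h : c == ch
    · have hc : c = ch := by simpa using h
      simp [pvRunLenA, List.takeWhile, ih, hc, List.replicate_succ]
    · simp [pvRunLenA, List.takeWhile, h]

theorem pvDrop_runLen (ch : Char) (l : List Char) :
    l.drop (pvRunLenA ch l) = l.dropWhile (· == ch) := by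
  induction l with
  | nil => rfl
  | cons c l ih =>
    by_cases h : c == ch <;> simp [pvRunLenA, List.dropWhile, h, ih]

theorem pvFold_inv (l : List Char) : ∀ (runs : List (List Char)) (r : List Char) (c : Char),
    List.foldl pvBStep (runs ++ [r ++ [c]]) l =
      runs ++ [(r ++ [c]) ++ l.takeWhile (· == c)] ++ pvRecRuns (l.dropWhile (· == c)) := by
  induction l with
  | nil => intro runs r c; simp [pvRecRuns_nil]
  | cons h t ih =>
    intro runs r c
    by_cases hc : h == c
    · have hc' : h = c := by simpa using hc
      have step : pvBStep (runs ++ [r ++ [c]]) h = runs ++ [(r ++ [c]) ++ [h]] := by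
        simp [pvBStep, hc']
      calc List.foldl pvBStep (runs ++ [r ++ [c]]) (h :: t)
          = List.foldl pvBStep (runs ++ [((r ++ [c])) ++ [h]]) t := by
            simp [List.foldl_cons, step]
        _ = runs ++ [((r ++ [c]) ++ [h]) ++ t.takeWhile (· == h)] ++ pvRecRuns (t.dropWhile (· == h)) := by
            rw [hc']; exact ih runs (r ++ [c]) c
        _ = runs ++ [(r ++ [c]) ++ (h :: t).takeWhile (· == c)] ++ pvRecRuns ((h :: t).dropWhile (· == c)) := by
            simp [List.takeWhile, List.dropWhile, hc']
    · have step : pvBStep (runs ++ [r ++ [c]]) h = (runs ++ [r ++ [c]]) ++ [[h]] := by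
        have : ¬ (c == h) := by simpa [BEq.comm] using hc
        simp [pvBStep, this]
      have := ih (runs ++ [r ++ [c]]) [] h
      simp only [List.nil_append] at this
      calc List.foldl pvBStep (runs ++ [r ++ [c]]) (h :: t)
          = List.foldl pvBStep ((runs ++ [r ++ [c]]) ++ [[h]]) t := by
            simp [List.foldl_cons, step]
        _ = (runs ++ [r ++ [c]]) ++ [h :: t.takeWhile (· == h)] ++ pvRecRuns (t.dropWhile (· == h)) := by
            simpa using this
        _ = runs ++ [(r ++ [c]) ++ (h :: t).takeWhile (· == c)] ++ pvRecRuns ((h :: t).dropWhile (· == c)) := by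
            simp [List.takeWhile, List.dropWhile, hc, pvRecRuns]
  
theorem pvFoldB (l : List Char) : List.foldl pvBStep [] l = pvRecRuns l := by
  cases l with
  | nil => simp [pvRecRuns_nil]
  | cons c t =>
    have h0 : pvBStep [] c = [[c]] := by simp [pvBStep]
    have := pvFold_inv t [] [] c
    simp only [List.nil_append] at this
    simp [List.foldl_cons, h0, this, pvRecRuns]

theorem pvA_eq_aux : ∀ (n : Nat) (l : List Char), l.length ≤ n →
    pvALoop l = ((pvRecRuns l).map pvBCollapse).flatten := by
  intro n
  induction n with
  | zero =>
    intro l hl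
    have : l = [] := by cases l <;> simp_all
    simp [this, pvALoop_nil, pvRecRuns_nil]
  | succ n ih =>
    intro l hl
    cases l with
    | nil => simp [pvALoop_nil, pvRecRuns_nil]
    | cons c rest =>
      have hdrop : rest.drop (pvRunLenA c rest) = rest.dropWhile (· == c) := pvDrop_runLen c rest
      have hlen : (rest.dropWhile (· == c)).length ≤ n := by
        have := List.length_dropWhile_le (· == c) rest
        simp at hl; omega
      have hrun : (c :: rest.takeWhile (· == c)) = List.replicate (pvRunLenA c rest + 1) c := by
        simp [pvTakeWhile_rep, List.replicate_succ]
      have hcoll : pvBCollapse (c :: rest.takeWhile (· == c)) =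
          (if 3 ≤ pvRunLenA c rest + 1 then [c] else List.replicate (pvRunLenA c rest + 1) c) := by
        rw [hrun]
        by_cases h3 : 3 ≤ pvRunLenA c rest + 1 <;>
          simp [pvBCollapse, h3, List.take_replicate]
      rw [pvALoop_cons]
      simp only [Nat.add_sub_cancel, hdrop]
      rw [pvRecRuns_cons]
      simp only [List.map_cons, List.flatten_cons, hcoll, ih _ hlen]

theorem pvA_eq (l : List Char) : pvALoop l = ((pvRecRuns l).map pvBCollapse).flatten :=
  pvA_eq_aux l.length l le_rfl

-- ===== VERDICT (by name: the statement is the Claim_ definition above) =====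
theorem collapse_repeats_py_spec : Claim_equal_collapse_repeats_py := by
  intro tok _
  unfold Spec_collapse_repeats_py collapse_repeats_py collapse_repeats_py_alt
  rw [pvA_eq, pvFoldB]
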